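-- pv_equiv track=rewrite | github.com/deylan16/Proyecto3Taller | logica.py | modaInversa
-- ===== SOURCE A (Python) =====
-- def modaInversa(lista):
--     frecuencia = {}
--
--     for valor in lista:
--         frecuencia[valor] = frecuencia.get(valor, 0) + 1
--
--     menosFrecuentes = min(frecuencia.values())
--
--     modas = [key for key, valor in frecuencia.items()
--                       if valor == menosFrecuentes]
--
--     return modas
-- ===== SOURCE B (Python) =====
-- def modaInversa(lista):
--     frecuencia = {}
--     for valor in lista:
--         frecuencia[valor] = frecuencia.get(valor, 0) + 1
--     # invert: bucket the keys by their frequency, then index by the minimal count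
--     buckets = {}
--     for key, cnt in frecuencia.items():
--         buckets.setdefault(cnt, []).append(key)
--     return buckets[min(buckets)]
-- ===== Notes on version B (the rewrite author's own statement) =====
-- stated objective: alternative
-- what changed: Instead of computing min(values) and re-scanning the frequency dict to filter, B inverts the frequency dict into count->keys buckets and returns the bucket of the minimal count directly.
import Mathlib
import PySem

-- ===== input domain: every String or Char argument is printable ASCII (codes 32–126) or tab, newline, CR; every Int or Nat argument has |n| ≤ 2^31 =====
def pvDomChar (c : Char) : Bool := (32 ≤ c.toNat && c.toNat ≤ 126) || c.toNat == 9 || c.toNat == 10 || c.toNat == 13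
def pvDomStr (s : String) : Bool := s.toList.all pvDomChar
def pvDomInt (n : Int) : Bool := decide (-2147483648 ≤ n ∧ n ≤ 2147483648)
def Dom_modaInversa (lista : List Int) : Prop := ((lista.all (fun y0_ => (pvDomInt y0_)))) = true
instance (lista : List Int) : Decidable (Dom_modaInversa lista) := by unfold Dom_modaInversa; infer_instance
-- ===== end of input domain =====

-- B buckets the keys by frequency and looks up the minimal count, instead of A's min-then-filter scan (alternative decomposition, same cost).

-- ===== PORT A =====
def modaInversa (lista : List Int) : List Int :=
  let frecuencia := lista.foldl (fun d v => d.insert v (d.getD v 0 + 1)) (PySem.Dict.empty : PySem.Dict Int Int)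
  match PySem.List.min? frecuencia.values (fun x => x) with
  | none => []   -- Python raises ValueError here (empty list); excluded by Pre_
  | some menosFrecuentes =>
      (frecuencia.items.filter (fun p => p.2 == menosFrecuentes)).map (·.1)

-- ===== PORT B =====
def modaInversa_alt (lista : List Int) : List Int :=
  let frecuencia := lista.foldl (fun d v => d.insert v (d.getD v 0 + 1)) (PySem.Dict.empty : PySem.Dict Int Int)
  let buckets := frecuencia.items.foldl
      (fun b p => b.modify p.2 [] (fun l => l ++ [p.1])) PySem.Dict.empty
  match PySem.List.min? buckets.keys (fun x => x) with
  | none => []   -- Python raises ValueError here (empty list); excluded by Pre_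
  | some m => buckets.getD m []

-- ===== PRECONDITION & SPEC =====
-- Pre_ excludes only the empty list, on which A raises ValueError (min of an empty sequence).
def Pre_modaInversa (lista : List Int) : Prop := lista ≠ []
instance (lista : List Int) : Decidable (Pre_modaInversa lista) := by unfold Pre_modaInversa; infer_instance
def pvWitness_modaInversa : List Int := [1, 2, 2]

def Spec_modaInversa (lista : List Int) (out : List Int) : Prop := out = modaInversa_alt lista
instance (lista : List Int) (out : List Int) : Decidable (Spec_modaInversa lista out) := by unfold Spec_modaInversa; infer_instance

-- ===== CLAIM (what is proved, stated in full; the proofs are below) =====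
def Claim_equal_modaInversa : Prop := ∀ (lista : List Int), Dom_modaInversa lista → Pre_modaInversa lista → Spec_modaInversa lista (modaInversa lista)

-- ===== LEMMAS AND PROOFS =====

-- min? with identity key returns THE minimum value, so it agrees on any list with the same members
lemma min?_id_eq_of_mem_iff (xs ys : List Int) (h : ∀ x, x ∈ xs ↔ x ∈ ys) :
    PySem.List.min? xs (fun x => x) = PySem.List.min? ys (fun x => x) := by
  match hx : PySem.List.min? xs (fun x => x), hy : PySem.List.min? ys (fun x => x) with
  | none, none => rfl
  | none, some m =>
      rw [PySem.List.min?_eq_none_iff] at hx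
      have := PySem.List.min?_mem hy
      rw [← h] at this; simp [hx] at this
  | some m, none =>
      rw [PySem.List.min?_eq_none_iff] at hy
      have := PySem.List.min?_mem hx
      rw [h] at this; simp [hy] at this
  | some m, some m' =>
      have hm := PySem.List.min?_mem hx
      have hm' := PySem.List.min?_mem hy
      have h1 := PySem.List.min?_isMin hx m' ((h m').mpr hm')
      have h2 := PySem.List.min?_isMin hy m ((h m).mp hm)
      simp at h1 h2
      exact congrArg some (le_antisymm h1 h2)

-- the bucket dict looked up at c gives exactly the keys whose count is c
lemma buckets_getD (items : List (Int × Int)) (c : Int) :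
    (items.foldl (fun b p => b.modify p.2 [] (fun l => l ++ [p.1]))
      (PySem.Dict.empty : PySem.Dict Int (List Int))).getD c []
    = (items.filter (fun p => p.2 == c)).map (·.1) := by
  have h := PySem.Dict.getD_foldl_modify_append (l := items.map (fun p => (p.2, p.1)))
      (d := (PySem.Dict.empty : PySem.Dict Int (List Int))) (c := c)
  rw [List.foldl_map] at h
  simp only [h, PySem.Dict.getD_empty, List.nil_append, List.filter_map, List.map_map]
  rfl

lemma buckets_keys (items : List (Int × Int)) :
    (items.foldl (fun b p => b.modify p.2 [] (fun l => l ++ [p.1]))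
      (PySem.Dict.empty : PySem.Dict Int (List Int))).keys
    = PySem.Set.ofList (items.map (·.2)) := by
  rw [PySem.Dict.keys_foldl_modify_key (key := fun p : Int × Int => p.2)]
  simp [PySem.Set.update_nil_left]

lemma ports_eq (F : PySem.Dict Int Int) :
    (match PySem.List.min? F.values (fun x => x) with
      | none => ([] : List Int)
      | some m => (F.items.filter (fun p => p.2 == m)).map (·.1))
    = (let B := F.items.foldl (fun b p => b.modify p.2 [] (fun l => l ++ [p.1]))
          (PySem.Dict.empty : PySem.Dict Int (List Int))
       match PySem.List.min? B.keys (fun x => x) with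
       | none => []
       | some m => B.getD m []) := by
  show _ = (match PySem.List.min? (F.items.foldl (fun b p => b.modify p.2 [] (fun l => l ++ [p.1]))
          (PySem.Dict.empty : PySem.Dict Int (List Int))).keys (fun x => x) with
       | none => ([] : List Int)
       | some m => (F.items.foldl (fun (b : PySem.Dict Int (List Int)) (p : Int × Int) => b.modify p.2 [] (fun l => l ++ [p.1]))
          (PySem.Dict.empty : PySem.Dict Int (List Int))).getD m [])
  have hmin : PySem.List.min? (F.items.foldl (fun b p => b.modify p.2 [] (fun l => l ++ [p.1]))
          (PySem.Dict.empty : PySem.Dict Int (List Int))).keys (fun x => x)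
      = PySem.List.min? F.values (fun x => x) := by
    apply min?_id_eq_of_mem_iff
    intro x
    rw [buckets_keys]
    simp only [PySem.Dict.values]
    exact PySem.Set.mem_ofList (xs := F.items.map (·.2)) x
  rw [hmin]
  cases hc : PySem.List.min? F.values (fun x => x) with
  | none => rfl
  | some m =>
      dsimp only
      rw [buckets_getD]

-- ===== VERDICT (by name: the statement is the Claim_ definition above) =====
theorem modaInversa_spec : Claim_equal_modaInversa := by
  intro lista _ _
  unfold Spec_modaInversa modaInversa modaInversa_alt
  exact ports_eq _
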